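-- pv_equiv track=rewrite | github.com/agairola/life-skills | skills/sydney-commute/scripts/commute.py | _product_classes_to_types
-- ===== SOURCE A (Python) =====
-- PRODUCT_CLASS_MAP = {
--     1: "train",
--     4: "lightrail",
--     5: "bus",
--     7: "coach",
--     9: "ferry",
--     11: "school_bus",
--     99: "walk",
--     100: "walk",
-- }
--
-- def _product_classes_to_types(classes: list | None) -> list[str]:
--     """Convert product class numbers to human-readable transport types."""
--     if not classes:
--         return []
--     types = []
--     for c in classes:
--         t = PRODUCT_CLASS_MAP.get(c)
--         if t and t not in types:
--             types.append(t)
--     return types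
-- ===== SOURCE B (Python) =====
-- PRODUCT_CLASS_MAP = {
--     1: "train",
--     4: "lightrail",
--     5: "bus",
--     7: "coach",
--     9: "ferry",
--     11: "school_bus",
--     99: "walk",
--     100: "walk",
-- }
--
-- def _product_classes_to_types(classes):
--     """Convert product class numbers to human-readable transport types."""
--     if not classes:
--         return []
--     # worklist of classes that actually map to a (truthy) type
--     remaining = [c for c in classes if PRODUCT_CLASS_MAP.get(c)]
--     out = []
--     while remaining:
--         # emit the type of the first remaining class, then prune every later
--         # class that maps to that same type; at most one pass per distinct type
--         t = PRODUCT_CLASS_MAP[remaining[0]]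
--         out.append(t)
--         remaining = [c for c in remaining[1:] if PRODUCT_CLASS_MAP[c] != t]
--     return out
-- ===== Notes on version B (the rewrite author's own statement) =====
-- stated objective: alternative
-- what changed: B replaces A's grow-and-scan dedup (append if 't not in types') with a worklist-pruning algorithm: it keeps the still-relevant classes, emits the type of the first one, and filters every later class mapping to that type out of the worklist, so no result-membership test or dedup container exists and the loop runs once per distinct type (at most 8 times).
import Mathlib
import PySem

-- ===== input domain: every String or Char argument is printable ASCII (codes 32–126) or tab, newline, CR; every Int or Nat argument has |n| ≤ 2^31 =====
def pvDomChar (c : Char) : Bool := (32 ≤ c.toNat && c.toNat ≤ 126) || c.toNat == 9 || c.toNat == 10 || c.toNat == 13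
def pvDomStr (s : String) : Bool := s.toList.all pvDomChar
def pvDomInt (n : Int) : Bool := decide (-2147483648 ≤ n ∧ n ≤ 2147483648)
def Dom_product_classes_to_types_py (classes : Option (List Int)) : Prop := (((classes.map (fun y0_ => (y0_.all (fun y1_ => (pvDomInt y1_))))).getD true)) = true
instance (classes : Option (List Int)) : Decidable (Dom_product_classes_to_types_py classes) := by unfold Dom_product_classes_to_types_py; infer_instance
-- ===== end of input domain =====

-- B drops A's growing-list membership test entirely: it keeps a worklist of still-unmapped
-- classes, emits the type of its first class, and prunes every later class mapping to that
-- same type from the worklist (at most one pruning pass per distinct type).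

-- PRODUCT_CLASS_MAP (module constant, shared context of both programs)
def pvProductClassMap : PySem.Dict Int String :=
  PySem.Dict.ofList [(1, "train"), (4, "lightrail"), (5, "bus"), (7, "coach"),
                     (9, "ferry"), (11, "school_bus"), (99, "walk"), (100, "walk")]

-- ===== PORT A =====
def product_classes_to_types_py (classes : Option (List Int)) : List String :=
  match classes with
  | none => []              -- 'if not classes: return []'
  | some cs =>
    if cs.isEmpty then [] else
      cs.foldl (fun types c =>
        match PySem.Dict.get? pvProductClassMap c with   -- t = PRODUCT_CLASS_MAP.get(c)
        | some t => if t ≠ "" && !(types.contains t) then types ++ [t] else types  -- if t and t not in types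
        | none => types) []

-- ===== PORT B =====
-- the 'while remaining:' loop of Source B; the worklist only ever holds classes present in the
-- map (so Python's PRODUCT_CLASS_MAP[...] inside the loop cannot raise and the 'none'
-- branch below is unreachable)
def pvPrune (remaining : List Int) : List String :=
  match remaining with
  | [] => []
  | c :: rest =>
    match PySem.Dict.get? pvProductClassMap c with       -- t = PRODUCT_CLASS_MAP[remaining[0]]
    | none => []            -- unreachable: 'remaining' holds only mapped classes
    | some t =>             -- out.append(t); remaining = [c for c in remaining[1:] if PRODUCT_CLASS_MAP[c] != t]
      t :: pvPrune (rest.filter (fun c' => !(PySem.Dict.get? pvProductClassMap c' == some t)))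
termination_by remaining.length
decreasing_by
  simp only [List.length_cons, List.length_unattach]
  exact Nat.lt_succ_of_le (le_trans (List.length_filter_le _ _) (Nat.le_of_eq List.length_attach))

def product_classes_to_types_py_alt (classes : Option (List Int)) : List String :=
  match classes with
  | none => []              -- 'if not classes: return []'
  | some cs =>
    if cs.isEmpty then [] else
      -- remaining = [c for c in classes if PRODUCT_CLASS_MAP.get(c)]
      pvPrune (cs.filter (fun c =>
        match PySem.Dict.get? pvProductClassMap c with
        | some t => !(t == "")
        | none => false))

-- ===== PRECONDITION & SPEC =====
def Spec_product_classes_to_types_py (classes : Option (List Int)) (out : List String) : Prop := out = product_classes_to_types_py_alt classes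
instance (classes : Option (List Int)) (out : List String) : Decidable (Spec_product_classes_to_types_py classes out) := by unfold Spec_product_classes_to_types_py; infer_instance

-- ===== CLAIM (what is proved, stated in full; the proofs are below) =====
def Claim_equal_product_classes_to_types_py : Prop := ∀ (classes : Option (List Int)), Dom_product_classes_to_types_py classes → Spec_product_classes_to_types_py classes (product_classes_to_types_py classes)

-- ===== LEMMAS AND PROOFS =====

-- unfolding lemmas for the well-founded pvPrune
theorem pvPrune_nil : pvPrune [] = [] := by conv_lhs => unfold pvPrune

theorem pvPrune_cons (c : Int) (l : List Int) :
    pvPrune (c :: l) = match PySem.Dict.get? pvProductClassMap c with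
      | none => []
      | some t => t :: pvPrune (l.filter (fun c' => !(PySem.Dict.get? pvProductClassMap c' == some t))) := by
  conv_lhs => unfold pvPrune

-- classes whose mapped type is truthy and not among the already-emitted types ts
def pvPredB (ts : List String) (c : Int) : Bool :=
  match PySem.Dict.get? pvProductClassMap c with
  | some u => !(u == "") && !(ts.contains u)
  | none => false

theorem filter_combine (cs : List Int) (ts : List String) (t : String) :
    (cs.filter (pvPredB ts)).filter (fun c => !(PySem.Dict.get? pvProductClassMap c == some t))
      = cs.filter (pvPredB (ts ++ [t])) := by
  rw [List.filter_filter]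
  apply List.filter_congr
  intro c _
  unfold pvPredB
  cases PySem.Dict.get? pvProductClassMap c with
  | none => simp
  | some u => by_cases h : u = t <;> simp [h]

-- A's accumulating loop equals B's prune loop run on the not-yet-emitted classes
theorem foldA_eq_prune (cs : List Int) (ts : List String) :
    cs.foldl (fun types c =>
        match PySem.Dict.get? pvProductClassMap c with
        | some t => if t ≠ "" && !(types.contains t) then types ++ [t] else types
        | none => types) ts
    = ts ++ pvPrune (cs.filter (pvPredB ts)) := by
  induction cs generalizing ts with
  | nil => simp [pvPrune_nil]
  | cons c rest ih =>
    cases hget : PySem.Dict.get? pvProductClassMap c with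
    | none =>
      have hp : pvPredB ts c = false := by simp [pvPredB, hget]
      have hstep : (match PySem.Dict.get? pvProductClassMap c with
          | some t => if t ≠ "" && !(ts.contains t) then ts ++ [t] else ts
          | none => ts) = ts := by simp [hget]
      rw [List.foldl_cons, List.filter_cons, hstep, hp]
      simp only [Bool.false_eq_true, if_false]
      exact ih ts
    | some t =>
      by_cases ht : t = ""
      · have hp : pvPredB ts c = false := by simp [pvPredB, hget, ht]
        have hstep : (match PySem.Dict.get? pvProductClassMap c with
            | some t => if t ≠ "" && !(ts.contains t) then ts ++ [t] else ts
            | none => ts) = ts := by simp [hget, ht]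
        rw [List.foldl_cons, List.filter_cons, hstep, hp]
        simp only [Bool.false_eq_true, if_false]
        exact ih ts
      · by_cases hmem : t ∈ ts
        · have hp : pvPredB ts c = false := by simp [pvPredB, hget, hmem]
          have hstep : (match PySem.Dict.get? pvProductClassMap c with
              | some t => if t ≠ "" && !(ts.contains t) then ts ++ [t] else ts
              | none => ts) = ts := by simp [hget, hmem]
          rw [List.foldl_cons, List.filter_cons, hstep, hp]
          simp only [Bool.false_eq_true, if_false]
          exact ih ts
        · have hp : pvPredB ts c = true := by simp [pvPredB, hget, ht, hmem]
          have hstep : (match PySem.Dict.get? pvProductClassMap c with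
              | some t => if t ≠ "" && !(ts.contains t) then ts ++ [t] else ts
              | none => ts) = ts ++ [t] := by simp [hget, ht, hmem]
          rw [List.foldl_cons, List.filter_cons, hstep, hp]
          simp only [reduceIte]
          rw [pvPrune_cons]
          simp only [hget]
          rw [filter_combine, ih (ts ++ [t])]
          simp

-- ===== VERDICT (by name: the statement is the Claim_ definition above) =====
theorem product_classes_to_types_py_spec : Claim_equal_product_classes_to_types_py := by
  unfold Claim_equal_product_classes_to_types_py
  intro classes _
  unfold Spec_product_classes_to_types_py product_classes_to_types_py product_classes_to_types_py_alt
  cases classes with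
  | none => rfl
  | some cs =>
    by_cases h : cs.isEmpty
    · simp [h]
    · simp only [h, Bool.false_eq_true, if_false]
      rw [foldA_eq_prune cs []]
      simp only [List.nil_append]
      congr 1
      apply List.filter_congr
      intro c _
      unfold pvPredB
      cases PySem.Dict.get? pvProductClassMap c <;> simp
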